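-- pv_equiv track=rewrite | github.com/mavren-26/Chris-code-54 | 35.py | count_valid_splits
-- ===== SOURCE A (Python) =====
-- def count_valid_splits(s: str) -> int:
--     n = len(s)
--     ans = 0
--     for i in range(1, n):
--         left = s[:i]
--         right = s[i:]
--         if left <= right:
--             ans += 1
--     return ans
-- ===== SOURCE B (Python) =====
-- def count_valid_splits(s: str) -> int:
--     # Z-algorithm: z[i] = length of the longest common prefix of s and s[i:],
--     # then each split is decided in O(1) from z[i].
--     n = len(s)
--     if n == 0:
--         return 0
--     z = [0] * n
--     l = r = 0
--     for i in range(1, n):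
--         zi = 0
--         if i < r:
--             zi = min(r - i, z[i - l])
--         while i + zi < n and s[zi] == s[i + zi]:
--             zi += 1
--         z[i] = zi
--         if i + zi > r:
--             l, r = i, i + zi
--     ans = 0
--     for i in range(1, n):
--         zi = z[i]
--         m = n - i
--         if zi >= min(i, m):
--             if i <= m:
--                 ans += 1
--         elif s[zi] < s[i + zi]:
--             ans += 1
--     return ans
-- ===== Notes on version B (the rewrite author's own statement) =====
-- stated objective: faster
-- what changed: Replaced the quadratic slice-and-compare over every split by the Z-algorithm: z[i] (the LCP of s and s[i:]) is computed once in linear time and each split is then decided in O(1) from z[i].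
import Mathlib
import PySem

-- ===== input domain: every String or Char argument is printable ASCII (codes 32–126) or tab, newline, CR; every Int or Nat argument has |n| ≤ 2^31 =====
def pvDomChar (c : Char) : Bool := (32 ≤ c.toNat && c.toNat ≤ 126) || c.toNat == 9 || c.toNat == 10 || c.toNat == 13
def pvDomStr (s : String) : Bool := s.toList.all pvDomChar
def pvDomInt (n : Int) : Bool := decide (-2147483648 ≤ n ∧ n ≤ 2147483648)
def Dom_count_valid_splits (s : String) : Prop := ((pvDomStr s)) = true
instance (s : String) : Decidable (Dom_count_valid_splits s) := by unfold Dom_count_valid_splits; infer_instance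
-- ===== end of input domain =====

-- B replaces A's quadratic slice-and-compare per split by the Z-algorithm (z[i] = LCP of s
-- and s[i:], computed once), deciding each split in O(1); return values proved equal.

-- ===== PORT A =====
-- for i in range(1, n): left = s[:i]; right = s[i:]; if left <= right: ans += 1
def count_valid_splits (s : String) : Int :=
  let cs := s.toList
  let n : Int := PySem.Str.len s
  (PySem.List.pyRange 1 n 1).foldl (fun ans i =>
    let left := PySem.List.slice cs none (some i)
    let right := PySem.List.slice cs (some i) none
    if left ≤ right then ans + 1 else ans) 0

-- ===== PORT B =====
-- the Z-extension while loop: `while i + zi < n and s[zi] == s[i+zi]: zi += 1`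
def zExt (cs : List Char) (i : Nat) (j : Nat) : Nat :=
  if h : i + j < cs.length ∧ cs.getD j 'a' = cs.getD (i + j) 'a' then
    zExt cs i (j + 1)
  else j
termination_by cs.length - (i + j)
decreasing_by omega

-- the Z-array construction loop (i runs from 1 to n-1; z is built by appending z[i])
def zLoop (cs : List Char) (n : Nat) (i : Nat) (z : List Nat) (l r : Nat) : List Nat :=
  if i < n then
    let j0 := if i < r then min (r - i) (z.getD (i - l) 0) else 0
    let zi := zExt cs i j0
    if i + zi > r then zLoop cs n (i + 1) (z ++ [zi]) i (i + zi)
    else zLoop cs n (i + 1) (z ++ [zi]) l r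
  else z
termination_by n - i
decreasing_by all_goals omega

-- second loop: decide each split from z[i] in O(1)
def countLoop (cs : List Char) (n : Nat) (z : List Nat) (i : Nat) (ans : Int) : Int :=
  if i < n then
    let zi := z.getD i 0
    let m := n - i
    let ans' :=
      if min i m ≤ zi then (if i ≤ m then ans + 1 else ans)
      else if cs.getD zi 'a' < cs.getD (i + zi) 'a' then ans + 1 else ans
    countLoop cs n z (i + 1) ans'
  else ans
termination_by n - i
decreasing_by omega

def count_valid_splits_alt (s : String) : Int :=
  let cs := s.toList
  let n := cs.length
  if n = 0 then 0
  else countLoop cs n (zLoop cs n 1 [0] 0 0) 1 0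

-- ===== PRECONDITION & SPEC =====
def Spec_count_valid_splits (s : String) (out : Int) : Prop := out = count_valid_splits_alt s
instance (s : String) (out : Int) : Decidable (Spec_count_valid_splits s out) := by unfold Spec_count_valid_splits; infer_instance

-- ===== CLAIM (what is proved, stated in full; the proofs are below) =====
def Claim_equal_count_valid_splits : Prop := ∀ (s : String), Dom_count_valid_splits s → Spec_count_valid_splits s (count_valid_splits s)


-- ===== LEMMAS AND PROOFS =====

-- longest common prefix length of two lists (spec for the Z-values)
def lcp : List Char → List Char → Nat
  | x::xs, y::ys => if x = y then lcp xs ys + 1 else 0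
  | _, _ => 0

theorem lcp_nil_right (a : List Char) : lcp a [] = 0 := by
  cases a <;> simp [lcp]

theorem lcp_le_right (a b : List Char) : lcp a b ≤ b.length := by
  induction a generalizing b with
  | nil => simp [lcp]
  | cons x xs ih =>
    cases b with
    | nil => simp [lcp]
    | cons y ys =>
      simp only [lcp]
      split_ifs <;> simp [Nat.succ_le_succ (ih _)]

theorem lcp_take {a b : List Char} {k : Nat} (h : k ≤ lcp a b) :
    a.take k = b.take k := by
  induction a generalizing b k with
  | nil =>
    have : k = 0 := by simpa [lcp] using h
    simp [this]
  | cons x xs ih =>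
    cases b with
    | nil => simp [lcp_nil_right] at h; simp [h]
    | cons y ys =>
      cases k with
      | zero => simp
      | succ k =>
        simp only [lcp] at h
        split_ifs at h with hxy
        · subst hxy; simp only [List.take_succ_cons]; exact congrArg (List.cons x) (ih (by omega))
        · omega

theorem le_lcp {a b : List Char} {k : Nat} (h : a.take k = b.take k)
    (hk : k ≤ a.length) : k ≤ lcp a b := by
  induction a generalizing b k with
  | nil =>
    have : k = 0 := by simpa using hk
    simp [this]
  | cons x xs ih =>
    cases k with
    | zero => omega
    | succ k =>
      cases b with
      | nil => simp at h
      | cons y ys =>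
        simp only [List.take_succ_cons, List.cons.injEq] at h
        simp only [lcp, h.1, if_pos]
        have := ih h.2 (by simpa using hk)
        omega

theorem lcp_drop {a b : List Char} {k : Nat} (h : k ≤ lcp a b) :
    lcp a b = k + lcp (a.drop k) (b.drop k) := by
  induction a generalizing b k with
  | nil =>
    have : k = 0 := by simpa [lcp] using h
    simp [this]
  | cons x xs ih =>
    cases k with
    | zero => simp
    | succ k =>
      cases b with
      | nil => simp [lcp_nil_right] at h
      | cons y ys =>
        simp only [lcp] at h ⊢
        split_ifs at h ⊢ with hxy
        · simp only [List.drop_succ_cons]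
          have := ih (b := ys) (k := k) (by omega)
          omega
        · omega

theorem lcp_take_left (a b : List Char) (k : Nat) :
    lcp (a.take k) b = min k (lcp a b) := by
  induction a generalizing b k with
  | nil => simp [lcp]
  | cons x xs ih =>
    cases k with
    | zero => simp [lcp]
    | succ k =>
      cases b with
      | nil => simp [lcp_nil_right]
      | cons y ys =>
        simp only [List.take_succ_cons, lcp]
        split_ifs
        · rw [ih]; omega
        · simp

-- pointwise consequence of a take-equality
theorem take_eq_pointwise {a b : List Char} {k : Nat} (h : a.take k = b.take k)
    (t : Nat) (ht : t < k) (ha : t < a.length) (hb : t < b.length) : a[t] = b[t] := by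
  have := congrArg (fun l => l[t]?) h
  simp only [List.getElem?_take, ht, if_pos] at this
  rw [List.getElem?_eq_getElem ha, List.getElem?_eq_getElem hb] at this
  exact Option.some.inj this

-- the while loop computes j plus the LCP of the two tails
theorem zExt_eq (cs : List Char) (i j : Nat) (hi : 0 < i) :
    zExt cs i j = j + lcp (cs.drop j) (cs.drop (i + j)) := by
  fun_induction zExt cs i j with
  | case1 j h ih =>
    rw [ih]
    have hij : i + j < cs.length := h.1
    have hjl : j < cs.length := by omega
    rw [List.drop_eq_getElem_cons hjl, List.drop_eq_getElem_cons hij]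
    have hc : cs[j] = cs[i + j] := by
      have := h.2
      rwa [List.getD_eq_getElem _ _ hjl, List.getD_eq_getElem _ _ hij] at this
    simp only [lcp, hc, if_pos]
    have : i + (j + 1) = i + j + 1 := by omega
    rw [this]
    omega
  | case2 j h =>
    rcases Decidable.not_and_iff_not_or_not.mp h with h1 | h2
    · have : cs.drop (i + j) = [] := by
        rw [List.drop_eq_nil_iff]
        omega
      simp [this, lcp_nil_right]
    · by_cases hij : i + j < cs.length
      · have hjl : j < cs.length := by omega
        rw [List.drop_eq_getElem_cons hjl, List.drop_eq_getElem_cons hij]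
        have hc : cs[j] ≠ cs[i + j] := by
          rw [List.getD_eq_getElem _ _ hjl, List.getD_eq_getElem _ _ hij] at h2
          exact h2
        simp [lcp, hc]
      · have : cs.drop (i + j) = [] := by
          rw [List.drop_eq_nil_iff]
          omega
        simp [this, lcp_nil_right]

-- started from any valid partial match, the while loop lands on the true Z-value
theorem zExt_start (cs : List Char) (i j : Nat) (hi : 0 < i)
    (hj : cs.take j = (cs.drop i).take j) (hjle : j ≤ cs.length - i) :
    zExt cs i j = lcp cs (cs.drop i) := by
  rw [zExt_eq cs i j hi]
  have hk : j ≤ lcp cs (cs.drop i) := le_lcp hj (by omega)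
  have := lcp_drop hk
  rw [List.drop_drop] at this
  omega

-- list ≤ on equal heads / distinct heads
theorem cons_le_cons_same (x : Char) (xs ys : List Char) : (x::xs ≤ x::ys) ↔ xs ≤ ys := by
  rw [← Std.not_lt, ← Std.not_lt]
  exact not_congr List.lex_cons_iff

theorem cons_le_cons_ne {x y : Char} (h : x ≠ y) (xs ys : List Char) :
    (x::xs ≤ y::ys) ↔ x < y := by
  rw [← Std.not_lt]
  show ¬ List.Lex (· < ·) (y::ys) (x::xs) ↔ x < y
  rw [List.cons_lex_cons_iff]
  push Not
  constructor
  · rintro ⟨h1, -⟩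
    exact lt_of_le_of_ne h1 h
  · intro hxy
    exact ⟨le_of_lt hxy, fun he => absurd he.symm h⟩

-- Python string order is lex order; first-mismatch characterisation
theorem lex_iff (a b : List Char) :
    a ≤ b ↔ (lcp a b = a.length ∨
      (lcp a b < a.length ∧ lcp a b < b.length ∧ a.getD (lcp a b) 'a' < b.getD (lcp a b) 'a')) := by
  induction a generalizing b with
  | nil =>
    have h1 : ([] : List Char) ≤ b := by
      rw [← Std.not_lt]
      exact List.not_lex_nil
    simp [lcp, h1]
  | cons x xs ih =>
    cases b with
    | nil => simp [lcp_nil_right, ← Std.not_lt]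
    | cons y ys =>
      by_cases hxy : x = y
      · subst hxy
        rw [cons_le_cons_same, ih]
        have hl : lcp (x::xs) (x::ys) = lcp xs ys + 1 := by simp [lcp]
        rw [hl]
        simp only [List.getD_cons_succ, List.length_cons]
        constructor
        · rintro (h | ⟨h1, h2, h3⟩)
          · exact Or.inl (by omega)
          · exact Or.inr ⟨by omega, by omega, h3⟩
        · rintro (h | ⟨h1, h2, h3⟩)
          · exact Or.inl (by omega)
          · exact Or.inr ⟨by omega, by omega, h3⟩
      · rw [cons_le_cons_ne hxy]
        simp [lcp, hxy]

-- A's split test equals B's O(1) decision from the Z-value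
theorem indicator_eq (cs : List Char) (n i : Nat) (ans : Int) (h1 : 0 < i) (h2 : i < n)
    (hn : n = cs.length) (zi : Nat) (hzi : zi = lcp cs (cs.drop i)) :
    (if cs.take i ≤ cs.drop i then ans + 1 else ans)
      = (if min i (n - i) ≤ zi then (if i ≤ n - i then ans + 1 else ans)
         else if cs.getD zi 'a' < cs.getD (i + zi) 'a' then ans + 1 else ans) := by
  have hzile : zi ≤ n - i := by
    rw [hzi, hn]
    have := lcp_le_right cs (cs.drop i)
    simpa using this
  have hlt : (cs.take i).length = i := by simp; omega
  have hld : (cs.drop i).length = n - i := by simp [hn]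
  have hmin : lcp (cs.take i) (cs.drop i) = min i zi := by rw [lcp_take_left, hzi]
  by_cases hcase : min i (n - i) ≤ zi
  · by_cases him : i ≤ n - i
    · have hle : cs.take i ≤ cs.drop i := by
        rw [lex_iff]
        left
        rw [hmin, hlt]
        omega
      rw [if_pos hle, if_pos hcase, if_pos him]
    · have hnle : ¬ (cs.take i ≤ cs.drop i) := by
        rw [lex_iff, hmin, hlt, hld]
        rintro (h | ⟨hx1, hx2, hx3⟩) <;> omega
      rw [if_neg hnle, if_pos hcase, if_neg him]
  · have hzi_lt_i : zi < i := by omega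
    have hzi_lt_m : zi < n - i := by omega
    have e1 : (cs.take i).getD zi 'a' = cs.getD zi 'a' := by
      rw [List.getD_eq_getElem _ _ (by omega : zi < (cs.take i).length),
        List.getD_eq_getElem _ _ (by omega : zi < cs.length)]
      simp [List.getElem_take]
    have e2 : (cs.drop i).getD zi 'a' = cs.getD (i + zi) 'a' := by
      rw [List.getD_eq_getElem _ _ (by omega : zi < (cs.drop i).length),
        List.getD_eq_getElem _ _ (by omega : i + zi < cs.length)]
      simp [List.getElem_drop]
    have hiff : (cs.take i ≤ cs.drop i) ↔ cs.getD zi 'a' < cs.getD (i + zi) 'a' := by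
      rw [lex_iff, hmin, hlt, hld, Nat.min_eq_right hzi_lt_i.le, e1, e2]
      constructor
      · rintro (h | ⟨-, -, h3⟩)
        · omega
        · exact h3
      · intro h
        exact Or.inr ⟨hzi_lt_i, hzi_lt_m, h⟩
    rw [if_neg hcase, if_congr hiff rfl rfl]

-- the Z-array loop is correct (invariant proof)
theorem zLoop_spec (cs : List Char) (n : Nat) (hn : n = cs.length) :
    ∀ (i : Nat) (z : List Nat) (l r : Nat), 0 < i → z.length = i →
    (∀ k, 0 < k → k < i → z.getD k 0 = lcp cs (cs.drop k)) →
    l ≤ r → r ≤ n →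
    (0 < r → 0 < l ∧ l < i ∧ cs.take (r - l) = (cs.drop l).take (r - l)) →
    ∀ k, 0 < k → k < n → (zLoop cs n i z l r).getD k 0 = lcp cs (cs.drop k) := by
  suffices main : ∀ (d i : Nat) (z : List Nat) (l r : Nat), n - i ≤ d → 0 < i → z.length = i →
      (∀ k, 0 < k → k < i → z.getD k 0 = lcp cs (cs.drop k)) →
      l ≤ r → r ≤ n →
      (0 < r → 0 < l ∧ l < i ∧ cs.take (r - l) = (cs.drop l).take (r - l)) →
      ∀ k, 0 < k → k < n → (zLoop cs n i z l r).getD k 0 = lcp cs (cs.drop k) by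
    exact fun i z l r => main (n - i) i z l r (le_refl _)
  intro d
  induction d with
  | zero =>
    intro i z l r hd hi hlen hzk hlr hrn hbox k hk1 hk2
    rw [zLoop, if_neg (by omega)]
    exact hzk k hk1 (by omega)
  | succ d ih =>
    intro i z l r hd hi hlen hzk hlr hrn hbox k hk1 hk2
    by_cases hin : i < n
    · -- the computed Z-value is the true LCP
      have hj0 : ∀ j0, j0 = (if i < r then min (r - i) (z.getD (i - l) 0) else 0) →
          zExt cs i j0 = lcp cs (cs.drop i) := by
        intro j0 hj0def
        by_cases hir : i < r
        · obtain ⟨hl0, hli, hbx⟩ := hbox (by omega)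
          have hz_il : z.getD (i - l) 0 = lcp cs (cs.drop (i - l)) :=
            hzk (i - l) (by omega) (by omega)
          rw [if_pos hir] at hj0def
          have hj0z : j0 ≤ lcp cs (cs.drop (i - l)) := by
            rw [← hz_il]
            omega
          have hj0r : j0 ≤ r - i := by omega
          have t1 : cs.take j0 = (cs.drop (i - l)).take j0 := lcp_take hj0z
          have t2 : (cs.drop (i - l)).take j0 = (cs.drop i).take j0 := by
            apply List.ext_getElem
            · simp [← hn]
              omega
            · intro t h1 h2
              simp only [List.getElem_take, List.getElem_drop]
              have hu : cs[l + (i - l + t)]'(by simp [← hn] at h1 h2 ⊢; omega)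
                  = (cs.drop l)[i - l + t]'(by simp [← hn] at h1 h2 ⊢; omega) := by
                simp [List.getElem_drop]
              have := take_eq_pointwise hbx (i - l + t)
                (by simp [← hn] at h1 h2 ⊢; omega)
                (by simp [← hn] at h1 h2 ⊢; omega)
                (by simp [← hn] at h1 h2 ⊢; omega)
              rw [this, ← hu]
              congr 1
              omega
          exact zExt_start cs i j0 hi (t1.trans t2) (by omega)
        · rw [if_neg hir] at hj0def
          subst hj0def
          exact zExt_start cs i 0 hi (by simp) (by omega)
      have hzi := hj0 _ rfl
      have hzn : lcp cs (cs.drop i) ≤ n - i := by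
        have := lcp_le_right cs (cs.drop i)
        simpa [← hn] using this
      -- step the loop
      rw [zLoop, if_pos hin]
      simp only [hzi]
      -- facts about the appended array
      have hzk' : ∀ k', 0 < k' → k' < i + 1 →
          (z ++ [lcp cs (cs.drop i)]).getD k' 0 = lcp cs (cs.drop k') := by
        intro k' h1 h2
        by_cases hki : k' < i
        · rw [List.getD_append _ _ _ _ (by omega)]
          exact hzk k' h1 hki
        · have : k' = i := by omega
          subst this
          rw [List.getD_append_right _ _ _ _ (by omega), hlen]
          simp
      have hlen' : (z ++ [lcp cs (cs.drop i)]).length = i + 1 := by simp [hlen]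
      by_cases hbr : i + lcp cs (cs.drop i) > r
      · rw [if_pos hbr]
        exact ih (i + 1) _ i (i + lcp cs (cs.drop i)) (by omega) (by omega) hlen' hzk'
          (by omega) (by omega)
          (fun _ => ⟨by omega, by omega, by
            have : i + lcp cs (cs.drop i) - i = lcp cs (cs.drop i) := by omega
            rw [this]
            exact lcp_take (le_refl _)⟩) k hk1 hk2
      · rw [if_neg hbr]
        exact ih (i + 1) _ l r (by omega) (by omega) hlen' hzk' hlr hrn
          (fun hr => ⟨(hbox hr).1, by have := (hbox hr).2.1; omega, (hbox hr).2.2⟩) k hk1 hk2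
    · rw [zLoop, if_neg hin]
      exact hzk k hk1 (by omega)

-- A's fold over the splits equals B's counting loop
theorem loops_eq (cs : List Char) (n : Nat) (z : List Nat) (hn : n = cs.length)
    (hz : ∀ k, 0 < k → k < n → z.getD k 0 = lcp cs (cs.drop k)) :
    ∀ (i : Nat) (ans : Int), 0 < i →
    (PySem.List.pyRange (i : Int) (n : Int) 1).foldl (fun ans i =>
      let left := PySem.List.slice cs none (some i)
      let right := PySem.List.slice cs (some i) none
      if left ≤ right then ans + 1 else ans) ans = countLoop cs n z i ans := by
  suffices main : ∀ (d i : Nat) (ans : Int), n - i ≤ d → 0 < i →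
      (PySem.List.pyRange (i : Int) (n : Int) 1).foldl (fun ans i =>
        let left := PySem.List.slice cs none (some i)
        let right := PySem.List.slice cs (some i) none
        if left ≤ right then ans + 1 else ans) ans = countLoop cs n z i ans by
    exact fun i ans hi => main (n - i) i ans (le_refl _) hi
  intro d
  induction d with
  | zero =>
    intro i ans hd hi
    rw [PySem.List.pyRange_one_eq_nil (by exact_mod_cast (by omega : n ≤ i)),
      countLoop, if_neg (by omega)]
    simp
  | succ d ih =>
    intro i ans hd hi
    by_cases hin : i < n
    · rw [PySem.List.pyRange_one_cons (by exact_mod_cast hin), countLoop, if_pos hin]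
      simp only [List.foldl_cons, PySem.List.slice_to_natCast, PySem.List.slice_from_natCast]
      rw [indicator_eq cs n i ans hi hin hn (z.getD i 0) (hz i hi hin)]
      have hcast : ((i : Int) + 1) = ((i + 1 : Nat) : Int) := by push_cast; ring
      rw [hcast]
      exact ih (i + 1) _ (by omega) (by omega)
    · rw [PySem.List.pyRange_one_eq_nil (by exact_mod_cast (by omega : n ≤ i)),
        countLoop, if_neg hin]
      simp

-- ===== VERDICT (by name: the statement is the Claim_ definition above) =====
theorem count_valid_splits_spec : Claim_equal_count_valid_splits := by
  intro s _
  unfold Spec_count_valid_splits count_valid_splits count_valid_splits_alt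
  simp only [PySem.Str.len_eq]
  by_cases h0 : s.toList.length = 0
  · simp [h0, PySem.List.pyRange_one_eq_nil]
  · have h1 : 0 < s.toList.length := Nat.pos_of_ne_zero h0
    simp only [h0, reduceIte]
    exact loops_eq s.toList s.toList.length _ rfl
      (zLoop_spec s.toList s.toList.length rfl 1 [0] 0 0 (by omega) (by simp)
        (by omega) (by omega) (by omega) (by omega)) 1 0 (by omega)
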